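-- pv_equiv track=rewrite | github.com/Nomalah/School | CIS-2910/week5/solution5.py | decryptRSA
-- ===== SOURCE A (Python) =====
-- def decryptRSA( ciphertext, d, q, p):
--     dp = d % (p - 1)
--     dq = d % (q - 1)
--
--     q_inv = 1
--     z = (-1 % (p-1))
--     for i in range(z):
--         q_inv = (q_inv * q) % p
--
--     for i in range(len(ciphertext)):
--         valp = ciphertext[i] % p
--         cp = 1
--         for j in range(dp):
--             cp = (cp * valp) % p
--
--         valq = ciphertext[i] % q
--         cq = 1
--         for j in range(dq):
--             cq = (cq * valq) % q
--
--         h = (q_inv * (cp - cq)) % p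
--         ciphertext[i] = cq + h * q
--
--     return ciphertext
-- ===== SOURCE B (Python) =====
-- def _powmod(base, e, m):
--     # square-and-multiply; returns 1 for e <= 0 (no multiplication happens)
--     result = 1
--     while e > 0:
--         if e % 2 == 1:
--             result = result * base % m
--         base = base * base % m
--         e //= 2
--     return result
--
--
-- def _combine(c, d_p, d_q, q_inv, q, p):
--     cp = _powmod(c % p, d_p, p)
--     cq = _powmod(c % q, d_q, q)
--     h = q_inv * (cp - cq) % p
--     return cq + h * q
--
--
-- def decryptRSA(ciphertext, d, q, p):
--     dp = d % (p - 1)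
--     dq = d % (q - 1)
--     q_inv = _powmod(q, -1 % (p - 1), p)
--     return [_combine(c, dp, dq, q_inv, q, p) for c in ciphertext]
-- ===== Notes on version B (the rewrite author's own statement) =====
-- stated objective: faster
-- what changed: replaces A's O(d)-step repeated-multiplication loops (for the exponentiations and the modular inverse) with square-and-multiply modular exponentiation, and builds a new list instead of index-wise in-place updates
import Mathlib
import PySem

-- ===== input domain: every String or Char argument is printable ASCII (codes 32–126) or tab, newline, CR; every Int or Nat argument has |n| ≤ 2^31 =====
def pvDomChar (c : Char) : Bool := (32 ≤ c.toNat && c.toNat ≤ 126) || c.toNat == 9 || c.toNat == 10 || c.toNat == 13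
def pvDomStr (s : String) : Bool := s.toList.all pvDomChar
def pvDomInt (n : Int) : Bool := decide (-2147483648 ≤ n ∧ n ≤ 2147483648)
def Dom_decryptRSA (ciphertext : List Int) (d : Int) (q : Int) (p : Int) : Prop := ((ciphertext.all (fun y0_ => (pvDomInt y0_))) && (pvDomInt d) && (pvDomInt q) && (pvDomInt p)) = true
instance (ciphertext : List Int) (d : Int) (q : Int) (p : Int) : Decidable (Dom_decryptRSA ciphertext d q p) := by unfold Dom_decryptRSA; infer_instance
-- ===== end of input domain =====

-- B replaces A's O(d)-step repeated-multiplication loops by square-and-multiply modular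
-- exponentiation (objective: faster, asymptotically). A mutates `ciphertext` in place; B builds a
-- new list — the equivalence proved here is about the RETURN value only.

-- ===== PORT A =====
-- body of A's `for i in range(len(ciphertext))` loop: the per-element computation
def pvStepA (c dp dq qinv q p : Int) : Int :=
  let valp := PySem.Int.mod c p
  let cp := (PySem.List.pyRange 0 dp).foldl (fun a _ => PySem.Int.mod (a * valp) p) 1
  let valq := PySem.Int.mod c q
  let cq := (PySem.List.pyRange 0 dq).foldl (fun a _ => PySem.Int.mod (a * valq) q) 1
  let h := PySem.Int.mod (qinv * (cp - cq)) p
  cq + h * q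

def decryptRSA (ciphertext : List Int) (d : Int) (q : Int) (p : Int) : List Int :=
  let dp := PySem.Int.mod d (p - 1)
  let dq := PySem.Int.mod d (q - 1)
  let z := PySem.Int.mod (-1) (p - 1)
  let qinv := (PySem.List.pyRange 0 z).foldl (fun a _ => PySem.Int.mod (a * q) p) 1
  (PySem.List.pyRange 0 (PySem.List.len ciphertext)).foldl
    (fun l i => l.set i.toNat (pvStepA (PySem.List.pyGetD l i 0) dp dq qinv q p)) ciphertext

-- ===== PORT B =====
-- _powmod's while loop (square-and-multiply); state (result, base, e)
def pvPowModGo (result base e m : Int) : Int :=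
  if _h : 0 < e then
    pvPowModGo (if PySem.Int.mod e 2 = 1 then PySem.Int.mod (result * base) m else result)
      (PySem.Int.mod (base * base) m) (PySem.Int.floordiv e 2) m
  else result
termination_by e.toNat
decreasing_by
  rw [PySem.Int.floordiv_eq_ediv_of_pos (by omega : (0:Int) < 2)]
  omega

def pvPowMod (base e m : Int) : Int := pvPowModGo 1 base e m

def pvCombine (c dp dq qinv q p : Int) : Int :=
  let cp := pvPowMod (PySem.Int.mod c p) dp p
  let cq := pvPowMod (PySem.Int.mod c q) dq q
  let h := PySem.Int.mod (qinv * (cp - cq)) p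
  cq + h * q

def decryptRSA_alt (ciphertext : List Int) (d : Int) (q : Int) (p : Int) : List Int :=
  let dp := PySem.Int.mod d (p - 1)
  let dq := PySem.Int.mod d (q - 1)
  let qinv := pvPowMod q (PySem.Int.mod (-1) (p - 1)) p
  ciphertext.map (fun c => pvCombine c dp dq qinv q p)

-- ===== PRECONDITION & SPEC =====
-- Pre_ excludes exactly the inputs where Python A raises ZeroDivisionError: p = 1 or q = 1
-- (d % (p-1) / d % (q-1)), or a nonempty ciphertext with p = 0 or q = 0 (ciphertext[i] % p / % q).
def Pre_decryptRSA (ciphertext : List Int) (d : Int) (q : Int) (p : Int) : Prop :=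
  p ≠ 1 ∧ q ≠ 1 ∧ (ciphertext = [] ∨ (p ≠ 0 ∧ q ≠ 0))
instance (ciphertext : List Int) (d : Int) (q : Int) (p : Int) : Decidable (Pre_decryptRSA ciphertext d q p) := by unfold Pre_decryptRSA; infer_instance

def pvWitness_decryptRSA : List Int × Int × Int × Int := ([2, 3, 10], 7, 11, 5)

def Spec_decryptRSA (ciphertext : List Int) (d : Int) (q : Int) (p : Int) (out : List Int) : Prop := out = decryptRSA_alt ciphertext d q p
instance (ciphertext : List Int) (d : Int) (q : Int) (p : Int) (out : List Int) : Decidable (Spec_decryptRSA ciphertext d q p out) := by unfold Spec_decryptRSA; infer_instance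

-- ===== CLAIM (what is proved, stated in full; the proofs are below) =====
def Claim_equal_decryptRSA : Prop := ∀ (ciphertext : List Int) (d : Int) (q : Int) (p : Int), Dom_decryptRSA ciphertext d q p → Pre_decryptRSA ciphertext d q p → Spec_decryptRSA ciphertext d q p (decryptRSA ciphertext d q p)

-- ===== LEMMAS AND PROOFS =====

-- reducing the left factor mod m first does not change a product mod m (Python/floor mod)
theorem pv_fmod_mul_left (a b m : Int) : ((a.fmod m) * b).fmod m = (a * b).fmod m := by
  conv_rhs => rw [← Int.fmod_add_mul_fdiv a m]
  rw [show (a.fmod m + m * a.fdiv m) * b = a.fmod m * b + m * (a.fdiv m * b) by ring,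
      Int.add_mul_fmod_self_left]

theorem pv_fmod_mul_right (a b m : Int) : (a * (b.fmod m)).fmod m = (a * b).fmod m := by
  rw [mul_comm a, pv_fmod_mul_left, mul_comm]

theorem pv_fmod_pow (a m : Int) (k : Nat) : ((a.fmod m) ^ k).fmod m = (a ^ k).fmod m := by
  induction k with
  | zero => simp
  | succ k ih =>
    rw [pow_succ, pv_fmod_mul_right, ← pv_fmod_mul_left, ih, pv_fmod_mul_left, ← pow_succ]

theorem pv_fmod_mul_pow (x y m : Int) (k : Nat) :
    (x * (y.fmod m) ^ k).fmod m = (x * y ^ k).fmod m := by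
  rw [mul_comm x, ← pv_fmod_mul_left ((y.fmod m) ^ k) x m, pv_fmod_pow, pv_fmod_mul_left,
      mul_comm]

-- the common value of both exponentiation routines
def pvPMSpec (v e m : Int) : Int := if e ≤ 0 then 1 else (v ^ e.toNat).fmod m

-- A's naive loop computes pvPMSpec
theorem pv_loopA_range (v m : Int) (n : Nat) :
    (List.range n).foldl (fun a _ => PySem.Int.mod (a * v) m) 1 =
      if n = 0 then 1 else (v ^ n).fmod m := by
  induction n with
  | zero => simp
  | succ n ih =>
    rw [List.range_succ, List.foldl_append, ih]
    by_cases hn : n = 0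
    · subst hn; simp [PySem.Int.mod]
    · simp only [hn, if_false, Nat.succ_ne_zero, List.foldl_cons, List.foldl_nil, PySem.Int.mod]
      rw [pv_fmod_mul_left, ← pow_succ]

theorem pv_loopA (v e m : Int) :
    (PySem.List.pyRange 0 e).foldl (fun a _ => PySem.Int.mod (a * v) m) 1 = pvPMSpec v e m := by
  unfold pvPMSpec
  by_cases he : e ≤ 0
  · rw [show PySem.List.pyRange 0 e = [] by simp [PySem.List.pyRange]; omega]
    simp [he]
  · have hr := PySem.List.pyRange_zero_natCast e.toNat
    rw [Int.toNat_of_nonneg (by omega : (0:Int) ≤ e)] at hr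
    rw [hr, List.foldl_map, pv_loopA_range, if_neg (by omega : ¬ e.toNat = 0), if_neg he]

-- B's square-and-multiply loop computes the same value
theorem pv_go_aux (n : Nat) : ∀ (e r b m : Int), e.toNat ≤ n →
    pvPowModGo r b e m = if e ≤ 0 then r else (r * b ^ e.toNat).fmod m := by
  induction n with
  | zero =>
    intro e r b m he
    rw [pvPowModGo.eq_def, dif_neg (by omega : ¬ (0:Int) < e), if_pos (by omega)]
  | succ n ih =>
    intro e r b m he
    rw [pvPowModGo.eq_def]
    by_cases hpos : 0 < e
    · rw [dif_pos hpos, if_neg (show ¬ e ≤ 0 by omega)]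
      rw [PySem.Int.floordiv_eq_ediv_of_pos (by omega : (0:Int) < 2),
          PySem.Int.mod_eq_emod_of_pos (by omega : (0:Int) < 2)]
      rw [ih (e / 2) (if e % 2 = 1 then PySem.Int.mod (r * b) m else r)
            (PySem.Int.mod (b * b) m) m (by omega)]
      simp only [PySem.Int.mod]
      by_cases hle : e / 2 ≤ 0
      · rw [if_pos hle, if_pos (by omega : e % 2 = 1),
            show e.toNat = 1 by omega, pow_one]
      · rw [if_neg hle]
        by_cases hodd : e % 2 = 1
        · rw [if_pos hodd, pv_fmod_mul_pow, pv_fmod_mul_left,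
              show (b * b) ^ (e / 2).toNat = b ^ (2 * (e / 2).toNat) by rw [← pow_two, ← pow_mul],
              show e.toNat = 2 * (e / 2).toNat + 1 by omega]
          ring_nf
        · rw [if_neg hodd, pv_fmod_mul_pow,
              show (b * b) ^ (e / 2).toNat = b ^ (2 * (e / 2).toNat) by rw [← pow_two, ← pow_mul],
              show e.toNat = 2 * (e / 2).toNat by omega]
    · rw [dif_neg hpos, if_pos (by omega)]

theorem pv_go (e : Int) (r b m : Int) :
    pvPowModGo r b e m = if e ≤ 0 then r else (r * b ^ e.toNat).fmod m :=
  pv_go_aux e.toNat e r b m le_rfl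

theorem pv_powMod (b e m : Int) : pvPowMod b e m = pvPMSpec b e m := by
  rw [pvPowMod, pv_go, pvPMSpec, one_mul]

theorem pv_step_eq (c dp dq qinv q p : Int) : pvStepA c dp dq qinv q p = pvCombine c dp dq qinv q p := by
  simp only [pvStepA, pvCombine, pv_loopA, pv_powMod]

-- A's index-wise in-place loop is a map: after processing the first k indices the list is
-- (l.take k).map f ++ l.drop k
theorem pv_fold_set_aux (f : Int → Int) (l : List Int) (k : Nat) (hk : k ≤ l.length) :
    (PySem.List.pyRange 0 (k : Int)).foldl
      (fun l' i => l'.set i.toNat (f (PySem.List.pyGetD l' i 0))) l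
      = (l.take k).map f ++ l.drop k := by
  induction k with
  | zero => simp [show PySem.List.pyRange 0 (0:Int) = [] by simp [PySem.List.pyRange]]
  | succ k ih =>
    have hlt : k < l.length := by omega
    rw [show ((k + 1 : Nat) : Int) = (k : Int) + 1 by push_cast; ring,
        PySem.List.pyRange_one_succ_right (by positivity), List.foldl_append,
        ih (by omega)]
    simp only [List.foldl_cons, List.foldl_nil]
    have hM : ((l.take k).map f).length = k := by
      simp [List.length_take, Nat.min_eq_left (le_of_lt hlt)]
    have hdrop : l.drop k = l[k] :: l.drop (k + 1) := List.drop_eq_getElem_cons hlt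
    rw [hdrop, PySem.List.pyGetD_natCast, Int.toNat_natCast,
        List.getD_eq_getElem _ _ (by simp; omega),
        List.getElem_append_right (by omega), List.set_append]
    simp only [hM, Nat.sub_self, lt_irrefl, if_false, List.set_cons_zero]
    simp only [List.map_take]
    rw [List.take_add_one, List.getElem?_map, List.getElem?_eq_getElem hlt]
    simp

theorem pv_fold_set (f : Int → Int) (l : List Int) :
    (PySem.List.pyRange 0 (PySem.List.len l)).foldl
      (fun l' i => l'.set i.toNat (f (PySem.List.pyGetD l' i 0))) l = l.map f := by
  rw [show PySem.List.len l = ((l.length : Nat) : Int) by simp [PySem.List.len],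
      pv_fold_set_aux f l l.length le_rfl]
  simp

-- ===== VERDICT (by name: the statement is the Claim_ definition above) =====
theorem decryptRSA_spec : Claim_equal_decryptRSA := by
  intro ct d q p _ _
  unfold Spec_decryptRSA decryptRSA decryptRSA_alt
  simp only []
  refine Eq.trans (pv_fold_set (fun c => pvStepA c (PySem.Int.mod d (p - 1))
      (PySem.Int.mod d (q - 1))
      ((PySem.List.pyRange 0 (PySem.Int.mod (-1) (p - 1))).foldl
        (fun a _ => PySem.Int.mod (a * q) p) 1) q p) ct) ?_
  refine List.map_congr_left (fun c _ => ?_)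
  rw [pv_step_eq, pv_loopA, ← pv_powMod]
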